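-- pv_equiv track=rewrite | github.com/Magenta195/Algorithm | 프로그래머스/1/135808. 과일 장수/과일 장수.py | solution
-- ===== SOURCE A (Python) =====
-- def solution(k, m, score):
--     if len(score) < m:
--         return 0
--     answer = 0
--     score.sort()
--
--     for i in range(len(score)-m, -1, -m):
--         answer += score[i]*m
--
--     return answer
-- ===== SOURCE B (Python) =====
-- def solution(k, m, score):
--     # Count each score once (hash map), then walk distinct scores in descending
--     # order; each block of equal scores contributes its value times m for every
--     # box boundary (multiple of m) it covers.  A sorts the whole list instead.
--     counts = {}
--     for v in score:
--         counts[v] = counts.get(v, 0) + 1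
--     full = (len(score) // m) * m  # number of fruits that go into full boxes
--     total = 0
--     seen = 0
--     for v in sorted(counts, reverse=True):
--         if seen >= full:
--             break
--         hi = seen + counts[v]
--         if hi > full:
--             hi = full
--         total += v * m * (hi // m - seen // m)
--         seen = hi
--     return total
-- ===== Notes on version B (the rewrite author's own statement) =====
-- stated objective: alternative
-- what changed: B replaces A's full sort plus backwards index stride by a hash-map count of each score, a sort of the distinct scores only, and one descending walk over (value, count) blocks that adds value*m for every box boundary the block covers via floor-division arithmetic.
-- outside the precondition, e.g. on solution(3, -2, [1, 2, 3]): A returns 0, B returns 8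
import Mathlib
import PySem

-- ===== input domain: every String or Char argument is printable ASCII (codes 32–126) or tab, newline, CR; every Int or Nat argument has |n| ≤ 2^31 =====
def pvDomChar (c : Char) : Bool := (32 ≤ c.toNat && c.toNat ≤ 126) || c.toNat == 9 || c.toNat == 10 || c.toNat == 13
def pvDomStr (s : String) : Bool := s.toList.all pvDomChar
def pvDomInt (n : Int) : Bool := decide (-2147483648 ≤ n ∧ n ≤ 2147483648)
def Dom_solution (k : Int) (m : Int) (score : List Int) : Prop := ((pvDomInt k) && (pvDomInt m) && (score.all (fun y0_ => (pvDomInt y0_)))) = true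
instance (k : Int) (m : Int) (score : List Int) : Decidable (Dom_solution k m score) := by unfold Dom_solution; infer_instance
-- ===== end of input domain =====

-- B counts scores in a hash map and walks the distinct values descending instead of
-- sorting the whole list and striding indices backwards (alternative algorithm, same result).
-- Note: Python A sorts `score` in place (observable mutation); B does not. The claim is about the return value.


-- ===== PORT A =====
def solution (k : Int) (m : Int) (score : List Int) : Int :=
  if (score.length : Int) < m then 0
  else
    let s := PySem.List.sorted score (fun x => x) false
    (PySem.List.pyRange ((s.length : Int) - m) (-1) (-m)).foldl
      (fun answer i => answer + PySem.List.pyGetD s i 0 * m) 0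

-- ===== PORT B =====
-- the `for v in sorted(counts, reverse=True): … break …` loop of Source B
def solutionAltLoop (m full : Int) (counts : PySem.Dict Int Int) :
    List Int → Int → Int → Int
  | [], total, _seen => total
  | v :: rest, total, seen =>
    if seen ≥ full then total
    else
      let hi0 := seen + counts.getD v 0
      let hi := if hi0 > full then full else hi0
      solutionAltLoop m full counts rest
        (total + v * m * (PySem.Int.floordiv hi m - PySem.Int.floordiv seen m)) hi

def solution_alt (k : Int) (m : Int) (score : List Int) : Int :=
  let counts := score.foldl (fun d v => d.insert v (d.getD v 0 + 1)) PySem.Dict.empty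
  let full := PySem.Int.floordiv (score.length : Int) m * m
  solutionAltLoop m full counts (PySem.List.sorted counts.keys (fun x => x) true) 0 0

-- ===== PRECONDITION & SPEC =====
-- Pre_ restricts to the task's natural domain of box sizes, m ≥ 1: at m = 0 A raises
-- ValueError (range step 0), and for m < 0 A's returned 0 is an artefact of an empty
-- backwards range over a negative-count input, outside the task's meaningful domain.
def Pre_solution (k : Int) (m : Int) (score : List Int) : Prop := 1 ≤ m
instance (k : Int) (m : Int) (score : List Int) : Decidable (Pre_solution k m score) := by
  unfold Pre_solution; infer_instance

def pvWitness_solution : Int × Int × List Int := (4, 2, [1, 2, 3, 1])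

def Spec_solution (k : Int) (m : Int) (score : List Int) (out : Int) : Prop := out = solution_alt k m score
instance (k : Int) (m : Int) (score : List Int) (out : Int) : Decidable (Spec_solution k m score out) := by unfold Spec_solution; infer_instance

-- ===== CLAIM (what is proved, stated in full; the proofs are below) =====
def Claim_equal_solution : Prop := ∀ (k : Int) (m : Int) (score : List Int), Dom_solution k m score → Pre_solution k m score → Spec_solution k m score (solution k m score)

-- ===== LEMMAS AND PROOFS =====

-- if the cursor is already at/past `full`, the loop adds nothing
lemma solutionAltLoop_done (m full : Int) (counts : PySem.Dict Int Int)
    (L : List Int) (total seen : Int) (h : seen ≥ full) :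
    solutionAltLoop m full counts L total seen = total := by
  cases L with
  | nil => rfl
  | cons v rest => simp [solutionAltLoop, h]

-- counting elements of a flatMap of replicates over a Nodup index list
lemma count_flatMap_replicate (K : List Int) (f : Int → ℕ) (v : Int) (hK : K.Nodup) :
    List.count v (K.flatMap fun u => List.replicate (f u) u)
      = if v ∈ K then f v else 0 := by
  induction K with
  | nil => simp
  | cons u K ih =>
    have hu : u ∉ K := (List.nodup_cons.mp hK).1
    have ih' := ih (List.nodup_cons.mp hK).2
    by_cases hv : v = u
    · subst hv
      simp [List.count_append, ih', hu]
    · simp [List.count_append, List.count_replicate, ih', Ne.symm hv, hv]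

-- a flatMap of replicates over a strictly increasing list is non-decreasing
lemma pairwise_le_flatMap_replicate (K : List Int) (f : Int → ℕ)
    (hK : K.Pairwise (· < ·)) :
    (K.flatMap fun u => List.replicate (f u) u).Pairwise (· ≤ ·) := by
  induction K with
  | nil => simp
  | cons u K ih =>
    rw [List.flatMap_cons, List.pairwise_append]
    refine ⟨?_, ih hK.of_cons, ?_⟩
    · rw [List.pairwise_replicate]; right; exact le_refl u
    · intro a ha b hb
      have ha' : a = u := (List.eq_of_mem_replicate ha)
      obtain ⟨w, hw, hbw⟩ := List.mem_flatMap.mp hb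
      have hb' : b = w := List.eq_of_mem_replicate hbw
      subst ha'; subst hb'
      exact le_of_lt (List.rel_of_pairwise_cons hK hw)

-- value of a replicate block inside an append decomposition
lemma getD_block (C : List Int) (c : ℕ) (v : Int) (R : List Int) (i : ℕ)
    (h1 : C.length ≤ i) (h2 : i < C.length + c) :
    (C ++ (List.replicate c v ++ R)).getD i 0 = v := by
  rw [List.getD_eq_getElem?_getD, List.getElem?_append_right h1,
    List.getElem?_append_left (by simpa using by omega : i - C.length < (List.replicate c v).length),
    List.getElem?_replicate, if_pos (by omega)]
  rfl

-- a list is its reverse read backwards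
lemma getD_reverse (l : List Int) (i : ℕ) (h : i < l.length) :
    l.getD i 0 = l.reverse.getD (l.length - 1 - i) 0 := by
  rw [List.getD_eq_getElem?_getD, List.getD_eq_getElem?_getD, List.getElem?_reverse (by omega)]
  congr 2
  omega

-- the descending sorted list is the flatMap of replicates over the descending distinct values
lemma reverse_sorted_eq_flatMap (score : List Int) :
    (PySem.List.sorted score (fun x => x) false).reverse
      = (PySem.List.sorted (PySem.Set.ofList score) (fun x => x) true).flatMap
          (fun v => List.replicate (List.count v score) v) := by
  set K := PySem.List.sorted (PySem.Set.ofList score) (fun x => x) false with hKdef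
  have hlt : K.Pairwise (· < ·) := PySem.List.sorted_ofList_pairwise_lt score
  have hnd : K.Nodup := hlt.imp (fun h => ne_of_lt h)
  have hmemK : ∀ v : Int, v ∈ K ↔ v ∈ score := by
    intro v
    rw [hKdef, PySem.List.mem_sorted, PySem.Set.mem_ofList]
  -- the flatMap over the ascending distinct values is sorted(score)
  have hasc : PySem.List.sorted score (fun x => x) false
      = K.flatMap (fun v => List.replicate (List.count v score) v) := by
    apply PySem.List.sorted_id_eq_of_perm_of_pairwise
    · rw [List.perm_iff_count]
      intro v
      rw [count_flatMap_replicate K _ v hnd]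
      by_cases hv : v ∈ K
      · simp [hv]
      · rw [if_neg hv]
        exact (List.count_eq_zero.mpr (fun hc => hv ((hmemK v).mpr hc))).symm
    · exact pairwise_le_flatMap_replicate K _ hlt
  -- the descending sort of the distinct values is the reverse of the ascending one
  have hdesc : PySem.List.sorted (PySem.Set.ofList score) (fun x => x) true = K.reverse := by
    apply PySem.List.sorted_rev_eq_of_perm_of_pairwise_gt
    · exact (List.reverse_perm K).trans (PySem.List.sorted_perm _ _ _)
    · exact List.pairwise_reverse.mpr hlt
  rw [hasc, hdesc, List.reverse_flatMap]
  apply List.flatMap_congr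
  intro v _
  simp [List.reverse_replicate]

-- the main loop invariant: with E = C ++ (remaining blocks), the loop adds exactly the
-- values at the box boundaries still to come
lemma loopSum (score E : List Int) (M : ℕ) (hM : 1 ≤ M) :
    ∀ (L C : List Int) (total : Int),
      E = C ++ L.flatMap (fun v => List.replicate (List.count v score) v) →
      solutionAltLoop (↑M) (↑(E.length / M * M)) (PySem.Dict.counter score) L total (↑C.length)
        = total + ((List.range (E.length / M - C.length / M)).map
            (fun t => E.getD ((C.length / M + t + 1) * M - 1) 0 * ↑M)).sum := by
  intro L
  induction L with
  | nil =>
    intro C total hE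
    rw [List.flatMap_nil, List.append_nil] at hE
    subst hE
    simp [solutionAltLoop]
  | cons v rest ih =>
    intro C total hE
    have hMpos : 0 < M := hM
    have hgetc : (PySem.Dict.counter score).getD v 0 = ↑(List.count v score) :=
      PySem.Dict.getD_counter score v
    rw [List.flatMap_cons] at hE
    set n := E.length with hn
    set b := n / M with hb
    set p := C.length with hp
    set c := List.count v score with hc
    have hE' : E = (C ++ List.replicate c v) ++
        rest.flatMap (fun u => List.replicate (List.count u score) u) := by
      rw [hE, List.append_assoc]
    -- one step of the loop
    simp only [solutionAltLoop, hgetc]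
    by_cases hge : b * M ≤ p
    · -- cursor already at/past full: loop stops, no boundaries remain
      rw [if_pos (by exact_mod_cast hge)]
      have hstop : b - p / M = 0 := by
        have : b ≤ p / M := (Nat.le_div_iff_mul_le hMpos).mpr hge
        omega
      rw [hstop]
      simp
    · have hlt : p < b * M := Nat.lt_of_not_le hge
      rw [if_neg (by push_cast; omega)]
      have hpb : p / M < b := (Nat.div_lt_iff_lt_mul hMpos).mpr hlt
      have hpdm : M * (p / M) + p % M = p := Nat.div_add_mod p M
      have hpm : p % M < M := Nat.mod_lt p hMpos
      by_cases hcap : (b * M : Int) < (p : Int) + (c : Int)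
      · -- the block covers every remaining boundary; loop caps at full and stops
        rw [if_pos (by push_cast; exact_mod_cast hcap)]
        rw [solutionAltLoop_done _ _ _ _ _ _ (le_refl _)]
        have hcap' : b * M < p + c := by exact_mod_cast hcap
        have hsum : ((List.range (b - p / M)).map
            (fun t => E.getD ((p / M + t + 1) * M - 1) 0 * (M : Int))).sum
            = (↑(b - p / M) : Int) * (↑v * ↑M) := by
          rw [List.map_congr_left (g := fun _ => (v : Int) * (M : Int)) ?_]
          · rw [PySem.List.sum_map_const_int, List.length_range]
          · intro t ht
            rw [List.mem_range] at ht
            have hjb : p / M + t + 1 ≤ b := by omega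
            have hjM : (p / M + t + 1) * M ≤ b * M := Nat.mul_le_mul_right M hjb
            have hjM1 : p < (p / M + t + 1) * M := by nlinarith
            rw [hE', List.append_assoc, getD_block C c v _ _ (by omega) (by
              have : (p / M + t + 1) * M - 1 < b * M := by omega
              omega)]
        rw [hsum, PySem.Int.floordiv_natCast, PySem.Int.floordiv_natCast,
          Nat.mul_div_cancel b hMpos]
        have : p / M ≤ b := le_of_lt hpb
        push_cast [Nat.cast_sub this]
        ring
      · -- the block ends before full: recurse with the block consumed
        rw [if_neg (by push_cast; exact_mod_cast hcap)]
        have hnocap : p + c ≤ b * M := by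
          have := hcap; push_cast at this; omega
        set q1 := p / M with hq1
        set q2 := (p + c) / M with hq2
        have hq12 : q1 ≤ q2 := Nat.div_le_div_right (by omega)
        have hq2b : q2 ≤ b := by
          have := Nat.div_le_div_right (c := M) hnocap
          rwa [Nat.mul_div_cancel b hMpos] at this
        have hlen' : ((C ++ List.replicate c v).length : Int) = (p : Int) + (c : Int) := by
          simp [List.length_append, List.length_replicate, hp]
        have ihe := ih (C ++ List.replicate c v)
          (total + ↑v * ↑M * (PySem.Int.floordiv ((p : Int) + (c : Int)) ↑M
            - PySem.Int.floordiv (↑p) ↑M)) hE'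
        rw [hlen'] at ihe
        have hlenN : (C ++ List.replicate c v).length = p + c := by
          simp [List.length_append, List.length_replicate, hp]
        rw [hlenN] at ihe
        rw [show ((p : Int) + (c : Int)) = ((p + c : ℕ) : Int) by push_cast; ring] at ihe ⊢
        rw [ihe]
        -- split the boundary sum at q2
        have hsplit : b - q1 = (q2 - q1) + (b - q2) := by omega
        rw [hsplit, List.range_add, List.map_append, List.sum_append, List.map_map]
        have hsum1 : ((List.range (q2 - q1)).map
            (fun t => E.getD ((q1 + t + 1) * M - 1) 0 * (M : Int))).sum
            = (↑(q2 - q1) : Int) * (↑v * ↑M) := by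
          rw [List.map_congr_left (g := fun _ => (v : Int) * (M : Int)) ?_]
          · rw [PySem.List.sum_map_const_int, List.length_range]
          · intro t ht
            rw [List.mem_range] at ht
            have hjb : q1 + t + 1 ≤ q2 := by omega
            have hjM : (q1 + t + 1) * M ≤ q2 * M := Nat.mul_le_mul_right M hjb
            have hq2M : q2 * M ≤ p + c := Nat.div_mul_le_self (p + c) M
            have hjM1 : p < (q1 + t + 1) * M := by nlinarith
            rw [hE', List.append_assoc, getD_block C c v _ _ (by omega) (by omega)]
        have hsum2 : ((List.range (b - q2)).map
            ((fun t => E.getD ((q1 + t + 1) * M - 1) 0 * (M : Int)) ∘ (fun x => (q2 - q1) + x))).sum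
            = ((List.range (b - q2)).map
            (fun t => E.getD ((q2 + t + 1) * M - 1) 0 * (M : Int))).sum := by
          apply congrArg
          apply List.map_congr_left
          intro t _
          simp only [Function.comp]
          have harith : q1 + ((q2 - q1) + t) + 1 = q2 + t + 1 := by omega
          rw [harith]
        rw [hsum1, hsum2, PySem.Int.floordiv_natCast, PySem.Int.floordiv_natCast, ← hq1, ← hq2]
        push_cast [Nat.cast_sub hq12]
        ring

-- ===== VERDICT (by name: the statement is the Claim_ definition above) =====
theorem solution_spec : Claim_equal_solution := by
  unfold Claim_equal_solution
  intro k m score _hdom hpre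
  unfold Spec_solution
  have hm : (1 : Int) ≤ m := hpre
  lift m to ℕ using (by omega : (0:Int) ≤ m) with M
  have hM : 1 ≤ M := by exact_mod_cast hm
  have hMpos : 0 < M := hM
  set n := score.length with hn
  set asc := PySem.List.sorted score (fun x => x) false with hascdef
  have hlenasc : asc.length = n := PySem.List.length_sorted _ _ _
  have hElen : asc.reverse.length = n := by simp [hlenasc]
  -- B's value, through the loop invariant
  have hB : solution_alt k (↑M) score
      = ((List.range (n / M)).map
          (fun t => asc.reverse.getD ((t + 1) * M - 1) 0 * (M : Int))).sum := by
    simp only [solution_alt, PySem.Dict.foldl_insert_getD_add_one_eq_counter,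
      PySem.Dict.keys_counter]
    rw [← hn, PySem.Int.floordiv_natCast,
      show ((n / M : ℕ) : Int) * (M : Int) = ((n / M * M : ℕ) : Int) by push_cast; ring]
    have h0 := loopSum score asc.reverse M hM
      (PySem.List.sorted (PySem.Set.ofList score) (fun x => x) true) [] 0
      (by simpa using reverse_sorted_eq_flatMap score)
    simp only [List.length_nil, Nat.cast_zero, Nat.zero_div, Nat.sub_zero, zero_add,
      hElen] at h0
    exact h0
  rw [hB]
  show (if (score.length : Int) < ↑M then 0
    else (PySem.List.pyRange (((PySem.List.sorted score (fun x => x) false).length : Int) - ↑M)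
      (-1) (-(M:Int))).foldl
      (fun answer i => answer + PySem.List.pyGetD (PySem.List.sorted score (fun x => x) false) i 0 * ↑M) 0) = _
  rw [← hascdef, ← hn]
  by_cases hsmall : (n : Int) < (M : Int)
  · -- fewer fruits than a box: A returns 0 and no boundary exists
    rw [if_pos hsmall]
    have : n / M = 0 := Nat.div_eq_of_lt (by exact_mod_cast hsmall)
    rw [this]
    simp
  · rw [if_neg hsmall]
    have hnM : M ≤ n := by exact_mod_cast not_lt.mp hsmall
    -- the backwards stride hits exactly the box boundaries
    have hrange : PySem.List.pyRange ((asc.length : Int) - ↑M) (-1) (-(M : Int))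
        = (List.range (n / M)).map (fun t => (n : Int) - ↑M - ↑M * ↑t) := by
      simp only [PySem.List.pyRange, hlenasc]
      rw [if_neg (by omega : ¬ (-(M : Int)) = 0)]
      rw [if_neg (by omega : ¬ (0 : Int) < -(M : Int))]
      rw [if_pos (by omega : (-1 : Int) < (n : Int) - ↑M)]
      rw [show ((n : Int) - ↑M - (-1) + -(-(M : Int)) - 1) / -(-(M : Int))
            = ((n / M : ℕ) : Int) by
          rw [neg_neg, show ((n : Int) - ↑M - (-1) + ↑M - 1) = (n : Int) by ring,
            ← Int.natCast_div]]
      rw [Int.toNat_natCast]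
      apply List.map_congr_left
      intro t _
      ring
    rw [hrange, List.foldl_map, PySem.List.foldl_add]
    rw [List.map_congr_left
      (g := fun t : ℕ => asc.reverse.getD ((t + 1) * M - 1) 0 * (M : Int)) ?_]
    · ring
    · intro t ht
      rw [List.mem_range] at ht
      have hk1 : M * (t + 1) ≤ n := by
        calc M * (t + 1) = (t + 1) * M := Nat.mul_comm _ _
        _ ≤ (n / M) * M := Nat.mul_le_mul_right M (by omega)
        _ ≤ n := Nat.div_mul_le_self n M
      rw [show ((n : Int) - ↑M - ↑M * ↑t) = ((n - M * (t + 1) : ℕ) : Int) by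
        rw [Nat.cast_sub hk1]; push_cast; ring]
      rw [PySem.List.pyGetD_natCast]
      rw [getD_reverse asc _ (by rw [hlenasc]; have := Nat.mul_pos hMpos (by omega : 0 < t + 1); omega)]
      congr 2
      rw [hlenasc, show (t + 1) * M = M * (t + 1) from Nat.mul_comm _ _]
      have h1 : 1 ≤ M * (t + 1) := Nat.mul_pos hMpos (by omega : 0 < t + 1)
      generalize hJ : M * (t + 1) = J at hk1 h1 ⊢
      omega
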